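-- pv_equiv track=rewrite | github.com/NewbieToLife/music_research | fuga.py | getChordsglobalharscore
-- ===== SOURCE A (Python) =====
-- harmonic_reference = [[0,7,14],[3,4,10,11],[2,5,9,12],[1,6,8,13]]
--
-- def getChordsglobalharscore(chords):
--     score = 0
--     for i in chords:
--         while i < 0:
--             i = i+7
--         if i in harmonic_reference[0]:
--             score = score + 7
--         elif i in harmonic_reference[1]:
--             score = score + 3
--         elif i in harmonic_reference[2]:
--             score = score - 3
--         elif i in harmonic_reference[3]:
--             score = score - 7
--
--     return(score)
-- ===== SOURCE B (Python) =====
-- # Scores are symmetric on the 7-cycle: the tier of a value n <= 14 depends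
-- # only on the circular distance of n % 7 from 0; values above 14 score 0.
-- _WEIGHT = (7, -7, -3, 3)  # weight by circular distance min(r, 7 - r)
--
-- def getChordsglobalharscore(chords):
--     total = 0
--     for i in chords:
--         if i <= 14:
--             r = i % 7
--             total += _WEIGHT[min(r, 7 - r)]
--     return total
-- ===== Notes on version B (the rewrite author's own statement) =====
-- stated objective: alternative
-- what changed: Replaces the repeat-add-7 normalization and four list-membership tiers by an arithmetic rule exploiting the 7-cycle symmetry of the scores: values above 14 score 0, otherwise the weight is indexed by the circular distance min(i%7, 7-i%7) into a 4-entry table.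
import Mathlib
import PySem

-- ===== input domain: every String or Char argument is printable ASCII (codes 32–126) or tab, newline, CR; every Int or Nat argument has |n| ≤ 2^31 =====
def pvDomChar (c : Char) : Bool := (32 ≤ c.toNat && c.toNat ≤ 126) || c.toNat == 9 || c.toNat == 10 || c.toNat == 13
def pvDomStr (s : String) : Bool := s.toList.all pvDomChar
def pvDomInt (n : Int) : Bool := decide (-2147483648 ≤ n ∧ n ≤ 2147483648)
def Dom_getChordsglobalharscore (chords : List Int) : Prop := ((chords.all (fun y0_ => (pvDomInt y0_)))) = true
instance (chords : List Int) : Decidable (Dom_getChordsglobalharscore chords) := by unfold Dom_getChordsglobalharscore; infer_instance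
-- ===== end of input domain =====

-- B replaces A's add-7 while loop and four membership scans by an arithmetic weight indexed by circular distance on the 7-cycle.

-- ===== PORT A =====
-- harmonic_reference = [[0,7,14],[3,4,10,11],[2,5,9,12],[1,6,8,13]]
def harmonic_reference : List (List Int) := [[0,7,14],[3,4,10,11],[2,5,9,12],[1,6,8,13]]

-- the 'while i < 0: i = i + 7' loop
def pvNormA (i : Int) : Int :=
  if i < 0 then pvNormA (i + 7) else i
termination_by (-i).toNat
decreasing_by omega

def getChordsglobalharscore (chords : List Int) : Int :=
  chords.foldl (fun score i0 =>
    let i := pvNormA i0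
    if i ∈ harmonic_reference[0]! then score + 7
    else if i ∈ harmonic_reference[1]! then score + 3
    else if i ∈ harmonic_reference[2]! then score - 3
    else if i ∈ harmonic_reference[3]! then score - 7
    else score) 0

-- ===== PORT B =====
def pvWeight : List Int := [7, -7, -3, 3]

def getChordsglobalharscore_alt (chords : List Int) : Int :=
  chords.foldl (fun total i =>
    if i ≤ 14 then
      let r := PySem.Int.mod i 7
      total + (PySem.List.pyGet? pvWeight (min r (7 - r))).getD 0
    else total) 0

-- ===== PRECONDITION & SPEC =====
def Spec_getChordsglobalharscore (chords : List Int) (out : Int) : Prop := out = getChordsglobalharscore_alt chords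
instance (chords : List Int) (out : Int) : Decidable (Spec_getChordsglobalharscore chords out) := by unfold Spec_getChordsglobalharscore; infer_instance

-- ===== CLAIM (what is proved, stated in full; the proofs are below) =====
def Claim_equal_getChordsglobalharscore : Prop := ∀ (chords : List Int), Dom_getChordsglobalharscore chords → Spec_getChordsglobalharscore chords (getChordsglobalharscore chords)

-- ===== LEMMAS AND PROOFS =====

lemma pvNormA_eq (i : Int) : pvNormA i = if i < 0 then i % 7 else i := by
  fun_induction pvNormA i with
  | case1 i h ih => rw [ih]; split_ifs <;> omega
  | case2 i h => simp [h]

lemma pvCell_eq (n : Int) (h0 : 0 ≤ n) (h1 : n ≤ 14) (s : Int) :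
    (if n ∈ harmonic_reference[0]! then s + 7
     else if n ∈ harmonic_reference[1]! then s + 3
     else if n ∈ harmonic_reference[2]! then s - 3
     else if n ∈ harmonic_reference[3]! then s - 7
     else s)
    = s + (PySem.List.pyGet? pvWeight (min (n % 7) (7 - n % 7))).getD 0 := by
  interval_cases n <;> simp [harmonic_reference, pvWeight, PySem.List.pyGet?, PySem.List.pyIdx?] <;> ring

lemma pvStep_eq (s i : Int) :
    (let n := pvNormA i
     if n ∈ harmonic_reference[0]! then s + 7
     else if n ∈ harmonic_reference[1]! then s + 3
     else if n ∈ harmonic_reference[2]! then s - 3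
     else if n ∈ harmonic_reference[3]! then s - 7
     else s)
    = (if i ≤ 14 then
        s + (PySem.List.pyGet? pvWeight (min (PySem.Int.mod i 7) (7 - PySem.Int.mod i 7))).getD 0
       else s) := by
  rw [PySem.Int.mod_eq_emod_of_pos (by omega)]
  by_cases hle : i ≤ 14
  · rw [if_pos hle]
    have hn : pvNormA i = if i < 0 then i % 7 else i := pvNormA_eq i
    by_cases hneg : i < 0
    · have : pvNormA i = i % 7 := by rw [hn, if_pos hneg]
      rw [this]
      have h7 : (i % 7) % 7 = i % 7 := Int.emod_emod_of_dvd i dvd_rfl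
      have hc := pvCell_eq (i % 7) (by omega) (by omega) s
      rw [h7] at hc
      exact hc
    · have : pvNormA i = i := by rw [hn, if_neg hneg]
      rw [this]
      exact pvCell_eq i (by omega) (by omega) s
  · rw [if_neg hle]
    have : pvNormA i = i := by rw [pvNormA_eq, if_neg (by omega)]
    rw [this]
    have h0 : i ∉ harmonic_reference[0]! := by simp [harmonic_reference]; omega
    have h1 : i ∉ harmonic_reference[1]! := by simp [harmonic_reference]; omega
    have h2 : i ∉ harmonic_reference[2]! := by simp [harmonic_reference]; omega
    have h3 : i ∉ harmonic_reference[3]! := by simp [harmonic_reference]; omega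
    simp only [if_neg h0, if_neg h1, if_neg h2, if_neg h3]

lemma pvFold_eq (chords : List Int) (s : Int) :
    List.foldl (fun (score : Int) (i0 : Int) =>
      let i := pvNormA i0
      if i ∈ harmonic_reference[0]! then score + 7
      else if i ∈ harmonic_reference[1]! then score + 3
      else if i ∈ harmonic_reference[2]! then score - 3
      else if i ∈ harmonic_reference[3]! then score - 7
      else score) s chords
    = List.foldl (fun (total : Int) (i : Int) =>
      if i ≤ 14 then
        let r := PySem.Int.mod i 7
        total + (PySem.List.pyGet? pvWeight (min r (7 - r))).getD 0
      else total) s chords := by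
  induction chords generalizing s with
  | nil => rfl
  | cons x xs ih =>
    simp only [List.foldl_cons]
    rw [pvStep_eq s x]
    exact ih _

-- ===== VERDICT (by name: the statement is the Claim_ definition above) =====
theorem getChordsglobalharscore_spec : Claim_equal_getChordsglobalharscore := by
  intro chords _
  unfold Spec_getChordsglobalharscore getChordsglobalharscore getChordsglobalharscore_alt
  exact pvFold_eq chords 0
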